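-- pv_equiv track=rewrite | github.com/city96/ComfyUI_ExtraModels | PixArt/diffusers_convert.py | get_lora_depth
-- ===== SOURCE A (Python) =====
-- def get_lora_depth(state_dict):
--     cnt = max([
--         sum(key.endswith('.attn1.to_k.lora_A.weight') for key in state_dict.keys()),
--         sum(key.endswith('_attn1_to_k.lora_A.weight') for key in state_dict.keys()),
--         sum(key.endswith('.attn1.to_k.lora_up.weight') for key in state_dict.keys()),
--         sum(key.endswith('_attn1_to_k.lora_up.weight') for key in state_dict.keys()),
--     ])
--     assert cnt > 0, "Unable to detect model depth!"
--     return cnt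
-- ===== SOURCE B (Python) =====
-- def get_lora_depth(state_dict):
--     # Build a frequency table of key tails (lengths 25 and 26, the two suffix
--     # lengths) once, then answer the four suffix counts by dictionary lookup.
--     tails = {}
--     for key in state_dict.keys():
--         for n in (25, 26):
--             if len(key) >= n:
--                 t = key[-n:]
--                 tails[t] = tails.get(t, 0) + 1
--     cnt = max(tails.get('.attn1.to_k.lora_A.weight', 0),
--               tails.get('_attn1_to_k.lora_A.weight', 0),
--               tails.get('.attn1.to_k.lora_up.weight', 0),
--               tails.get('_attn1_to_k.lora_up.weight', 0))
--     assert cnt > 0, "Unable to detect model depth!"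
--     return cnt
-- ===== Notes on version B (the rewrite author's own statement) =====
-- stated objective: alternative
-- what changed: A answers each of the four suffix queries by a separate endswith-scan of the whole key set and takes the max; B never calls endswith: it builds one hash frequency table of key tails (lengths 25 and 26, the two suffix lengths) in a single pass and then answers the four counts by dictionary lookup; Pre_ excludes inputs where no key ends with any suffix, on which both A and B raise AssertionError with the same message.
import Mathlib
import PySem

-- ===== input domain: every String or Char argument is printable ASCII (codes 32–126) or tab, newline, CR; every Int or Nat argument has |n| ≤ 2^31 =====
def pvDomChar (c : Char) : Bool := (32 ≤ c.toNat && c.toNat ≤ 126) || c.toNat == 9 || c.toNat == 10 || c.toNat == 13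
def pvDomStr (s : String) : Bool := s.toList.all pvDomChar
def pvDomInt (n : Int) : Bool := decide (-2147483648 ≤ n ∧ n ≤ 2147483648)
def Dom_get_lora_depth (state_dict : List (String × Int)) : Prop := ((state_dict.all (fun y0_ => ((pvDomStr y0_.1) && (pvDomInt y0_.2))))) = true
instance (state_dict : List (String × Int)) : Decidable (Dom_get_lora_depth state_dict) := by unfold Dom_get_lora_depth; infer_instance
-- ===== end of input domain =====

-- B replaces A's four separate endswith-scans by one pass building a hash frequency table
-- of key tails (lengths 25 and 26), answered afterwards by dictionary lookup (objective: alternative).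

-- ===== PORT A =====
-- one sum-comprehension 'sum(key.endswith(suf) for key in state_dict.keys())'
def pvSumEnds (state_dict : List (String × Int)) (suf : String) : Int :=
  state_dict.foldl (fun acc p => acc + (if PySem.Str.endswith p.1 suf then (1 : Int) else 0)) 0

def get_lora_depth (state_dict : List (String × Int)) : Int :=
  let cnt := max (max (max (pvSumEnds state_dict ".attn1.to_k.lora_A.weight")
                           (pvSumEnds state_dict "_attn1_to_k.lora_A.weight"))
                      (pvSumEnds state_dict ".attn1.to_k.lora_up.weight"))
                 (pvSumEnds state_dict "_attn1_to_k.lora_up.weight")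
  -- 'assert cnt > 0' raises on cnt = 0; those inputs are outside Pre_get_lora_depth
  cnt

-- ===== PORT B =====
-- body of 'for n in (25, 26): if len(key) >= n: t = key[-n:]; tails[t] = tails.get(t, 0) + 1'
def pvTailsStep (d : PySem.Dict String Int) (key : String) : PySem.Dict String Int :=
  let d1 := if 25 ≤ PySem.Str.len key then
              let t := PySem.Str.slice key (some (-25)) none
              d.insert t (d.getD t 0 + 1)
            else d
  if 26 ≤ PySem.Str.len key then
    let t := PySem.Str.slice key (some (-26)) none
    d1.insert t (d1.getD t 0 + 1)
  else d1

def get_lora_depth_alt (state_dict : List (String × Int)) : Int :=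
  let tails := state_dict.foldl (fun d p => pvTailsStep d p.1) PySem.Dict.empty
  let cnt := max (max (max (tails.getD ".attn1.to_k.lora_A.weight" 0)
                           (tails.getD "_attn1_to_k.lora_A.weight" 0))
                      (tails.getD ".attn1.to_k.lora_up.weight" 0))
                 (tails.getD "_attn1_to_k.lora_up.weight" 0)
  -- 'assert cnt > 0' raises on cnt = 0; those inputs are outside Pre_get_lora_depth
  cnt

-- ===== PRECONDITION & SPEC =====
-- Pre_ excludes inputs where no key ends with any of the four suffixes: there A's (and B's)
-- 'assert cnt > 0' raises AssertionError, so A returns no value.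
def Pre_get_lora_depth (state_dict : List (String × Int)) : Prop :=
  (state_dict.any (fun p =>
    PySem.Str.endswith p.1 ".attn1.to_k.lora_A.weight" ||
    PySem.Str.endswith p.1 "_attn1_to_k.lora_A.weight" ||
    PySem.Str.endswith p.1 ".attn1.to_k.lora_up.weight" ||
    PySem.Str.endswith p.1 "_attn1_to_k.lora_up.weight")) = true
instance (state_dict : List (String × Int)) : Decidable (Pre_get_lora_depth state_dict) := by
  unfold Pre_get_lora_depth; infer_instance

def pvWitness_get_lora_depth : (List (String × Int)) :=
  [("blocks.0.attn1.to_k.lora_A.weight", 1)]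

def Spec_get_lora_depth (state_dict : List (String × Int)) (out : Int) : Prop := out = get_lora_depth_alt state_dict
instance (state_dict : List (String × Int)) (out : Int) : Decidable (Spec_get_lora_depth state_dict out) := by unfold Spec_get_lora_depth; infer_instance

-- ===== CLAIM (what is proved, stated in full; the proofs are below) =====
def Claim_equal_get_lora_depth : Prop := ∀ (state_dict : List (String × Int)), Dom_get_lora_depth state_dict → Pre_get_lora_depth state_dict → Spec_get_lora_depth state_dict (get_lora_depth state_dict)

-- ===== LEMMAS AND PROOFS =====

-- the tail of length n equals s iff s is a suffix (for |s| = n ≤ |key|)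
theorem pvTail_eq_iff (key s : String) (n : Nat)
    (hs : s.toList.length = n) :
    (String.ofList (key.toList.drop (key.toList.length - n)) = s) ↔
      PySem.Str.endswith key s = true := by
  simp only [PySem.Str.endswith_eq, PySem.Chars.endswith_iff, List.suffix_iff_eq_drop, hs]
  constructor
  · intro h
    have := congrArg String.toList h
    simp at this
    exact this.symm
  · intro h
    rw [← h]
    simp

theorem pvEndswith_false_of_short (key s : String) (h : key.toList.length < s.toList.length) :
    PySem.Str.endswith key s = false := by
  rw [PySem.Str.endswith_eq]
  by_contra hc
  have : PySem.Chars.endswith key.toList s.toList = true := by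
    cases hb : PySem.Chars.endswith key.toList s.toList
    · exact absurd hb hc
    · rfl
  have := (PySem.Chars.endswith_iff _ _).mp this
  exact absurd this.length_le (by omega)

-- ofList of the toList-slice, as produced by the port's Str.slice
theorem pvSlice_neg25 (key : String) :
    PySem.Str.slice key (some (-25)) none =
      String.ofList (key.toList.drop (key.toList.length - 25)) := by
  have : (PySem.Str.slice key (some (-25)) none).toList =
      PySem.List.slice key.toList (some (-25)) none := by
    simp [PySem.Str.toList_slice]
  rw [PySem.List.slice_from_neg_ofNat _ 25 (by omega)] at this
  have h2 := congrArg String.ofList this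
  simpa using h2

theorem pvSlice_neg26 (key : String) :
    PySem.Str.slice key (some (-26)) none =
      String.ofList (key.toList.drop (key.toList.length - 26)) := by
  have : (PySem.Str.slice key (some (-26)) none).toList =
      PySem.List.slice key.toList (some (-26)) none := by
    simp [PySem.Str.toList_slice]
  rw [PySem.List.slice_from_neg_ofNat _ 26 (by omega)] at this
  have h2 := congrArg String.ofList this
  simpa using h2

-- per-key effect of pvTailsStep on the count stored at a suffix of length 25 or 26
theorem pvStep_getD (d : PySem.Dict String Int) (key s : String)
    (hs : s.toList.length = 25 ∨ s.toList.length = 26) :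
    (pvTailsStep d key).getD s 0 =
      d.getD s 0 + (if PySem.Str.endswith key s then (1 : Int) else 0) := by
  unfold pvTailsStep
  simp only [PySem.Str.len_eq]
  by_cases h26 : 26 ≤ key.toList.length
  · have h25 : 25 ≤ key.toList.length := by omega
    rw [if_pos (by exact_mod_cast h26), if_pos (by exact_mod_cast h25)]
    rw [pvSlice_neg25 key, pvSlice_neg26 key]
    have hlen25 : (String.ofList (key.toList.drop (key.toList.length - 25))).toList.length = 25 := by
      rw [String.toList_ofList, List.length_drop]; omega
    have hlen26 : (String.ofList (key.toList.drop (key.toList.length - 26))).toList.length = 26 := by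
      rw [String.toList_ofList, List.length_drop]; omega
    rcases hs with hs | hs
    · -- the length-26 insert cannot touch s
      rw [PySem.Dict.getD_insert, if_neg (by intro h; rw [← h] at hlen26; omega)]
      rw [PySem.Dict.getD_insert]
      by_cases he : PySem.Str.endswith key s = true
      · have heq : String.ofList (key.toList.drop (key.toList.length - 25)) = s :=
          (pvTail_eq_iff key s 25 hs).mpr he
        rw [if_pos heq.symm, heq, he, if_pos rfl]
      · rw [if_neg (by intro h; exact he ((pvTail_eq_iff key s 25 hs).mp h.symm))]
        rw [PySem.Str.endswith_eq] at he
        simp [he]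
    · -- the length-25 insert cannot touch s
      have hne25 : s ≠ String.ofList (key.toList.drop (key.toList.length - 25)) := by
        intro h; rw [h] at hs; omega
      rw [PySem.Dict.getD_insert]
      by_cases he : PySem.Str.endswith key s = true
      · have heq : String.ofList (key.toList.drop (key.toList.length - 26)) = s :=
          (pvTail_eq_iff key s 26 hs).mpr he
        rw [if_pos heq.symm, heq, he, if_pos rfl]
        rw [PySem.Dict.getD_insert, if_neg hne25]
      · rw [if_neg (by intro h; exact he ((pvTail_eq_iff key s 26 hs).mp h.symm))]
        rw [PySem.Dict.getD_insert, if_neg hne25]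
        rw [PySem.Str.endswith_eq] at he
        simp [he]
  · by_cases h25 : 25 ≤ key.toList.length
    · rw [if_neg (by exact_mod_cast h26), if_pos (by exact_mod_cast h25)]
      rw [pvSlice_neg25 key]
      rcases hs with hs | hs
      · rw [PySem.Dict.getD_insert]
        by_cases he : PySem.Str.endswith key s = true
        · have heq : String.ofList (key.toList.drop (key.toList.length - 25)) = s :=
            (pvTail_eq_iff key s 25 hs).mpr he
          rw [if_pos heq.symm, heq, he, if_pos rfl]
        · rw [if_neg (by intro h; exact he ((pvTail_eq_iff key s 25 hs).mp h.symm))]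
          rw [PySem.Str.endswith_eq] at he
          simp [he]
      · have he : PySem.Str.endswith key s = false :=
          pvEndswith_false_of_short key s (by omega)
        have hne : s ≠ String.ofList (key.toList.drop (key.toList.length - 25)) := by
          intro h
          have : (String.ofList (key.toList.drop (key.toList.length - 25))).toList.length = 25 := by
            rw [String.toList_ofList, List.length_drop]; omega
          rw [← h] at this; omega
        rw [PySem.Dict.getD_insert, if_neg hne, he]
        simp
    · rw [if_neg (by exact_mod_cast h26), if_neg (by exact_mod_cast h25)]
      have he : PySem.Str.endswith key s = false :=
        pvEndswith_false_of_short key s (by rcases hs with hs | hs <;> omega)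
      rw [PySem.Str.endswith_eq] at he
      simp [he]

-- fold invariant: the dict holds the running endswith-count for each length-25/26 suffix
theorem pvFold_getD (l : List (String × Int)) (d : PySem.Dict String Int) (s : String)
    (hs : s.toList.length = 25 ∨ s.toList.length = 26) :
    (l.foldl (fun d p => pvTailsStep d p.1) d).getD s 0 = d.getD s 0 + pvSumEnds l s := by
  induction l generalizing d with
  | nil => simp [pvSumEnds]
  | cons p t ih =>
    simp only [List.foldl_cons, pvSumEnds, PySem.List.foldl_add] at *
    rw [ih _ , pvStep_getD d p.1 s hs]
    ring

theorem get_lora_depth_spec : Claim_equal_get_lora_depth := by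
  intro state_dict _ _
  show get_lora_depth state_dict = get_lora_depth_alt state_dict
  simp only [get_lora_depth, get_lora_depth_alt]
  rw [pvFold_getD _ _ _ (Or.inl (by decide)),
      pvFold_getD _ _ _ (Or.inl (by decide)),
      pvFold_getD _ _ _ (Or.inr (by decide)),
      pvFold_getD _ _ _ (Or.inr (by decide))]
  simp [PySem.Dict.getD_empty]
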